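-- pv_equiv track=rewrite | github.com/BioDT/bfm-data | bfm_data/dataset_creation/batch_creation/scan_biocube.py | _infer_slot
-- ===== SOURCE A (Python) =====
-- _SLOT_GROUPS = {
--     "surface_variables"      : {"msl", "t2m", "u10", "v10"},
--     "single_variables"       : {"stl", "z", "lsm"},
--     "atmospheric_variables"  : {"t", "q", "u", "v", "z"},
--     "edaphic_variables"      : {"stl1", "swvl2", "stl2", "swvl2"},
--     "climate_variables"      : {"d2m", "tp", "avg_sdswrf", "avg_sdswrfcs", "avg_snlwrf", "avg_snswrf", "avg_tprate", "csfr", "sd", "smlt"},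
-- }
--
-- def _infer_slot(vars_: list[str]) -> str:
--     """
--     Decide slot by **largest intersection** with canonical groups.
--     Falls back to 'misc_variables' if no match.
--     """
--     vset = set(vars_)
--     best_slot, best_score = "misc_variables", 0
--     for slot, group in _SLOT_GROUPS.items():
--         score = len(vset & group)
--         if score > best_score:
--             best_slot, best_score = slot, score
--     return best_slot
-- ===== SOURCE B (Python) =====
-- # Inverted index: for each known variable, the slots (in declaration order) whose group contains it.
-- _VAR_SLOTS = {
--     "msl": ["surface_variables"],
--     "t2m": ["surface_variables"],
--     "u10": ["surface_variables"],
--     "v10": ["surface_variables"],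
--     "stl": ["single_variables"],
--     "z": ["single_variables", "atmospheric_variables"],
--     "lsm": ["single_variables"],
--     "t": ["atmospheric_variables"],
--     "q": ["atmospheric_variables"],
--     "u": ["atmospheric_variables"],
--     "v": ["atmospheric_variables"],
--     "stl1": ["edaphic_variables"],
--     "swvl2": ["edaphic_variables"],
--     "stl2": ["edaphic_variables"],
--     "d2m": ["climate_variables"],
--     "tp": ["climate_variables"],
--     "avg_sdswrf": ["climate_variables"],
--     "avg_sdswrfcs": ["climate_variables"],
--     "avg_snlwrf": ["climate_variables"],
--     "avg_snswrf": ["climate_variables"],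
--     "avg_tprate": ["climate_variables"],
--     "csfr": ["climate_variables"],
--     "sd": ["climate_variables"],
--     "smlt": ["climate_variables"],
-- }
--
-- _SLOT_ORDER = [
--     "surface_variables",
--     "single_variables",
--     "atmospheric_variables",
--     "edaphic_variables",
--     "climate_variables",
-- ]
--
--
-- def _infer_slot(vars_: list[str]) -> str:
--     """One pass over the distinct input variables, crediting each variable's
--     slots via a static inverted index; then pick the first slot (in
--     declaration order) with a strictly larger tally than all earlier ones."""
--     counts = {}
--     seen = set()
--     for v in vars_:
--         if v in seen:
--             continue
--         seen.add(v)
--         for s in _VAR_SLOTS.get(v, []):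
--             counts[s] = counts.get(s, 0) + 1
--     best, score = "misc_variables", 0
--     for s in _SLOT_ORDER:
--         c = counts.get(s, 0)
--         if c > score:
--             best, score = s, c
--     return best
-- ===== Notes on version B (the rewrite author's own statement) =====
-- stated objective: alternative
-- what changed: Replaced the per-group set-intersection scan with a single pass over the deduplicated input that credits each variable's slots through a static inverted index, then a declaration-order scan picks the first strictly-best slot.
import Mathlib
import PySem

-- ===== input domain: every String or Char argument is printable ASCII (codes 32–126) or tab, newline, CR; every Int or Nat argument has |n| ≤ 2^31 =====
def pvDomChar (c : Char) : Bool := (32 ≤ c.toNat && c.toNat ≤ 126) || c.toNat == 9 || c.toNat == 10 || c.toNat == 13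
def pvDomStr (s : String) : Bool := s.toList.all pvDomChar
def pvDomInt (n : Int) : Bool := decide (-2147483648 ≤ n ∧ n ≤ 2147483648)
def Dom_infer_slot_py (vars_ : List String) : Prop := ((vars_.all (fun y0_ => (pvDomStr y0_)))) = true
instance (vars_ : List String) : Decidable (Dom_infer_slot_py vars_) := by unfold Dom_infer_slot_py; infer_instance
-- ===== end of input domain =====

-- B replaces A's per-group set-intersection scan by one pass over the distinct input
-- variables crediting each variable's slots via a static inverted index (alternative decomposition).


-- ===== PORT A =====
-- _SLOT_GROUPS as an insertion-ordered assoc list of (slot, group-as-set)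
def slotGroups : List (String × PySem.Set String) :=
  [ ("surface_variables", ["msl", "t2m", "u10", "v10"]),
    ("single_variables", ["stl", "z", "lsm"]),
    ("atmospheric_variables", ["t", "q", "u", "v", "z"]),
    ("edaphic_variables", ["stl1", "swvl2", "stl2"]),
    ("climate_variables", ["d2m", "tp", "avg_sdswrf", "avg_sdswrfcs", "avg_snlwrf",
                           "avg_snswrf", "avg_tprate", "csfr", "sd", "smlt"]) ]

def infer_slot_py (vars_ : List String) : String :=
  let vset := PySem.Set.ofList vars_
  let r := slotGroups.foldl (fun (st : String × Int) sg =>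
      let score : Int := PySem.Set.len (PySem.Set.inter vset sg.2)
      if score > st.2 then (sg.1, score) else st) ("misc_variables", 0)
  r.1

-- ===== PORT B =====
-- static inverted index: variable -> slots whose group contains it
def varSlots : PySem.Dict String (List String) :=
  PySem.Dict.ofList
  [ ("msl", ["surface_variables"]), ("t2m", ["surface_variables"]),
    ("u10", ["surface_variables"]), ("v10", ["surface_variables"]),
    ("stl", ["single_variables"]),
    ("z", ["single_variables", "atmospheric_variables"]),
    ("lsm", ["single_variables"]),
    ("t", ["atmospheric_variables"]), ("q", ["atmospheric_variables"]),
    ("u", ["atmospheric_variables"]), ("v", ["atmospheric_variables"]),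
    ("stl1", ["edaphic_variables"]), ("swvl2", ["edaphic_variables"]),
    ("stl2", ["edaphic_variables"]),
    ("d2m", ["climate_variables"]), ("tp", ["climate_variables"]),
    ("avg_sdswrf", ["climate_variables"]), ("avg_sdswrfcs", ["climate_variables"]),
    ("avg_snlwrf", ["climate_variables"]), ("avg_snswrf", ["climate_variables"]),
    ("avg_tprate", ["climate_variables"]), ("csfr", ["climate_variables"]),
    ("sd", ["climate_variables"]), ("smlt", ["climate_variables"]) ]

def slotOrder : List String :=
  ["surface_variables", "single_variables", "atmospheric_variables",
   "edaphic_variables", "climate_variables"]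

-- the tally loop: skip already-seen variables, else credit each slot of the variable
def tallyStep (st : PySem.Set String × PySem.Dict String Int) (v : String) :
    PySem.Set String × PySem.Dict String Int :=
  if PySem.Set.contains st.1 v then st
  else (PySem.Set.add st.1 v,
        (PySem.Dict.getD varSlots v []).foldl
          (fun c s => PySem.Dict.modify c s 0 (· + 1)) st.2)

def infer_slot_py_alt (vars_ : List String) : String :=
  let counts := (vars_.foldl tallyStep (PySem.Set.empty, PySem.Dict.empty)).2
  let r := slotOrder.foldl (fun (st : String × Int) s =>
      let c := PySem.Dict.getD counts s 0
      if c > st.2 then (s, c) else st) ("misc_variables", 0)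
  r.1

-- ===== PRECONDITION & SPEC =====
def Spec_infer_slot_py (vars_ : List String) (out : String) : Prop := out = infer_slot_py_alt vars_
instance (vars_ : List String) (out : String) : Decidable (Spec_infer_slot_py vars_ out) := by unfold Spec_infer_slot_py; infer_instance

-- ===== CLAIM (what is proved, stated in full; the proofs are below) =====
def Claim_equal_infer_slot_py : Prop := ∀ (vars_ : List String), Dom_infer_slot_py vars_ → Spec_infer_slot_py vars_ (infer_slot_py vars_)

-- ===== LEMMAS AND PROOFS =====

-- per-variable inverted-index facts for all 5 groups at once
lemma idx_all (v : String) :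
    (((PySem.Dict.getD varSlots v []).count "surface_variables" : Int) = if (["msl","t2m","u10","v10"] : List String).contains v then 1 else 0)
  ∧ (((PySem.Dict.getD varSlots v []).count "single_variables" : Int) = if (["stl","z","lsm"] : List String).contains v then 1 else 0)
  ∧ (((PySem.Dict.getD varSlots v []).count "atmospheric_variables" : Int) = if (["t","q","u","v","z"] : List String).contains v then 1 else 0)
  ∧ (((PySem.Dict.getD varSlots v []).count "edaphic_variables" : Int) = if (["stl1","swvl2","stl2"] : List String).contains v then 1 else 0)
  ∧ (((PySem.Dict.getD varSlots v []).count "climate_variables" : Int) = if (["d2m","tp","avg_sdswrf","avg_sdswrfcs","avg_snlwrf","avg_snswrf","avg_tprate","csfr","sd","smlt"] : List String).contains v then 1 else 0) := by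
  by_cases h1 : v = "msl"; · subst h1; decide
  by_cases h2 : v = "t2m"; · subst h2; decide
  by_cases h3 : v = "u10"; · subst h3; decide
  by_cases h4 : v = "v10"; · subst h4; decide
  by_cases h5 : v = "stl"; · subst h5; decide
  by_cases h6 : v = "z"; · subst h6; decide
  by_cases h7 : v = "lsm"; · subst h7; decide
  by_cases h8 : v = "t"; · subst h8; decide
  by_cases h9 : v = "q"; · subst h9; decide
  by_cases h10 : v = "u"; · subst h10; decide
  by_cases h11 : v = "v"; · subst h11; decide
  by_cases h12 : v = "stl1"; · subst h12; decide
  by_cases h13 : v = "swvl2"; · subst h13; decide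
  by_cases h14 : v = "stl2"; · subst h14; decide
  by_cases h15 : v = "d2m"; · subst h15; decide
  by_cases h16 : v = "tp"; · subst h16; decide
  by_cases h17 : v = "avg_sdswrf"; · subst h17; decide
  by_cases h18 : v = "avg_sdswrfcs"; · subst h18; decide
  by_cases h19 : v = "avg_snlwrf"; · subst h19; decide
  by_cases h20 : v = "avg_snswrf"; · subst h20; decide
  by_cases h21 : v = "avg_tprate"; · subst h21; decide
  by_cases h22 : v = "csfr"; · subst h22; decide
  by_cases h23 : v = "sd"; · subst h23; decide
  by_cases h24 : v = "smlt"; · subst h24; decide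
  have hkeys : PySem.Dict.keys varSlots = ["msl","t2m","u10","v10","stl","z","lsm","t","q","u","v","stl1","swvl2","stl2","d2m","tp","avg_sdswrf","avg_sdswrfcs","avg_snlwrf","avg_snswrf","avg_tprate","csfr","sd","smlt"] := by decide
  have hnone : PySem.Dict.get? varSlots v = none := by
    rw [PySem.Dict.get?_eq_none_iff_not_mem_keys, hkeys]
    simp [h1,h2,h3,h4,h5,h6,h7,h8,h9,h10,h11,h12,h13,h14,h15,h16,h17,h18,h19,h20,h21,h22,h23,h24]
  have hg : PySem.Dict.getD varSlots v [] = [] := by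
    rw [PySem.Dict.getD_eq_get?_getD, hnone]; rfl
  rw [hg]
  simp [List.contains_eq_mem, h1,h2,h3,h4,h5,h6,h7,h8,h9,h10,h11,h12,h13,h14,h15,h16,h17,h18,h19,h20,h21,h22,h23,h24]

lemma tally_getD (s : String) (g : List String)
    (hidx : ∀ v : String, ((PySem.Dict.getD varSlots v []).count s : Int) = if g.contains v then 1 else 0) :
    ∀ (vars : List String) (seen : PySem.Set String) (counts : PySem.Dict String Int),
    PySem.Dict.getD ((vars.foldl tallyStep (seen, counts)).2) s 0
      = PySem.Dict.getD counts s 0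
        + (((PySem.Set.update seen vars).filter (fun x => g.contains x)).length : Int)
        - ((seen.filter (fun x => g.contains x)).length : Int) := by
  intro vars
  induction vars with
  | nil => intro seen counts; simp [PySem.Set.update]
  | cons v vs ih =>
    intro seen counts
    simp only [List.foldl_cons, tallyStep]
    by_cases hc : PySem.Set.contains seen v = true
    · have hadd : PySem.Set.add seen v = seen := by
        simp [PySem.Set.add]
        simp [PySem.Set.contains_eq_listContains] at hc
        exact hc
      have hupd : PySem.Set.update seen (v :: vs) = PySem.Set.update seen vs := by
        simp [PySem.Set.update, List.foldl_cons, hadd]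
      rw [if_pos hc, hupd]
      exact ih seen counts
    · rw [if_neg hc]
      have hadd : PySem.Set.add seen v = seen ++ [v] := by
        simp [PySem.Set.add]
        simp [PySem.Set.contains_eq_listContains] at hc
        exact hc
      have hupd : PySem.Set.update seen (v :: vs) = PySem.Set.update (seen ++ [v]) vs := by
        simp [PySem.Set.update, List.foldl_cons, hadd]
      rw [hadd, hupd]
      have hcounts : PySem.Dict.getD ((PySem.Dict.getD varSlots v []).foldl
            (fun c s' => PySem.Dict.modify c s' 0 (· + 1)) counts) s 0
          = PySem.Dict.getD counts s 0 + (if g.contains v then 1 else 0) := by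
        rw [PySem.Dict.getD_foldl_modify_add_one, hidx]
      rw [ih (seen ++ [v]) _, hcounts]
      have : ((seen ++ [v]).filter (fun x => g.contains x)).length
           = (seen.filter (fun x => g.contains x)).length + (if g.contains v then 1 else 0) := by
        by_cases hv : v ∈ g <;> simp [List.contains_eq_mem, List.filter_append, hv]
      rw [this]
      push_cast
      by_cases hv : v ∈ g <;> simp [List.contains_eq_mem, hv] <;> ring

lemma score_eq (vars : List String) (s : String) (g : List String)
    (hidx : ∀ v : String, ((PySem.Dict.getD varSlots v []).count s : Int) = if g.contains v then 1 else 0) :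
    PySem.Dict.getD ((vars.foldl tallyStep (PySem.Set.empty, PySem.Dict.empty)).2) s 0
      = PySem.Set.len (PySem.Set.inter (PySem.Set.ofList vars) g) := by
  rw [tally_getD s g hidx vars PySem.Set.empty PySem.Dict.empty]
  simp [PySem.Set.empty, PySem.Set.update_nil_left, PySem.Dict.getD_empty,
        PySem.Set.len, PySem.Set.inter, PySem.Set.contains]

-- ===== VERDICT (by name: the statement is the Claim_ definition above) =====
theorem infer_slot_py_spec : Claim_equal_infer_slot_py := by
  intro vars _
  show infer_slot_py vars = infer_slot_py_alt vars
  have t1 := score_eq vars "surface_variables" ["msl","t2m","u10","v10"] (fun v => (idx_all v).1)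
  have t2 := score_eq vars "single_variables" ["stl","z","lsm"] (fun v => (idx_all v).2.1)
  have t3 := score_eq vars "atmospheric_variables" ["t","q","u","v","z"] (fun v => (idx_all v).2.2.1)
  have t4 := score_eq vars "edaphic_variables" ["stl1","swvl2","stl2"] (fun v => (idx_all v).2.2.2.1)
  have t5 := score_eq vars "climate_variables" ["d2m","tp","avg_sdswrf","avg_sdswrfcs","avg_snlwrf","avg_snswrf","avg_tprate","csfr","sd","smlt"] (fun v => (idx_all v).2.2.2.2)
  simp only [infer_slot_py, infer_slot_py_alt, slotGroups, slotOrder, List.foldl]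
  rw [t1, t2, t3, t4, t5]
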